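-- pv_equiv track=rewrite | github.com/SufyanTipu/car-cruise-web-project | is1.py | rotor_cipher
-- ===== SOURCE A (Python) =====
-- def rotor_cipher(text, rotors, encrypt=True):
--     result = text.upper()
--     for rotor in rotors:
--         shift = rotor if encrypt else -rotor
--         result = ''.join(
--             chr((ord(char) - 65 + shift) % 26 + 65) if char.isalpha() else char for char in result
--         )
--     return result
-- ===== SOURCE B (Python) =====
-- def rotor_cipher(text, rotors, encrypt=True):
--     total = sum(rotors) % 26
--     if not encrypt:
--         total = -total
--     out = []
--     for ch in text.upper():
--         if ch.isalpha():
--             out.append(chr((ord(ch) - 65 + total) % 26 + 65))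
--         else:
--             out.append(ch)
--     return ''.join(out)
-- ===== Notes on version B (the rewrite author's own statement) =====
-- stated objective: faster
-- what changed: Instead of re-mapping the whole string once per rotor, B sums all rotor shifts modulo 26 and applies a single Caesar shift in one pass over the text.
import Mathlib
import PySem

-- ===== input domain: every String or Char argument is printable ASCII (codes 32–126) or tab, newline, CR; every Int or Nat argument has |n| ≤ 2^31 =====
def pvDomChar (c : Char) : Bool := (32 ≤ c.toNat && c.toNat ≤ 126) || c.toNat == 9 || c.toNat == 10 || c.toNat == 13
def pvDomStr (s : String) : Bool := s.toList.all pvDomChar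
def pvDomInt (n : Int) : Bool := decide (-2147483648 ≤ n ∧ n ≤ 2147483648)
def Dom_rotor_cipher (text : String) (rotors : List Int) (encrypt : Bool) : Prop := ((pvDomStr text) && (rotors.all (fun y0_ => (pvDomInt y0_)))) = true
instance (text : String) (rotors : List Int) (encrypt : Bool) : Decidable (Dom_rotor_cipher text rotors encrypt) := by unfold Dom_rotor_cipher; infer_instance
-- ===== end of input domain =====

-- B replaces A's one full pass over the text per rotor by a single pass with all rotor shifts summed mod 26.

-- per-char Caesar step, the identical expression in both Pythons:
-- chr((ord(char) - 65 + shift) % 26 + 65) if char.isalpha() else char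
def shiftChar (shift : Int) (c : Char) : Char :=
  if PySem.Chars.isalpha c then
    Char.ofNat ((PySem.Int.mod ((c.toNat : Int) - 65 + shift) 26 + 65).toNat)
  else c

-- ===== PORT A =====
def rotor_cipher (text : String) (rotors : List Int) (encrypt : Bool) : String :=
  rotors.foldl
    (fun result rotor =>
      let shift : Int := if encrypt then rotor else -rotor
      String.ofList (result.toList.map (shiftChar shift)))
    (PySem.Str.upper text)

-- ===== PORT B =====
def rotor_cipher_alt (text : String) (rotors : List Int) (encrypt : Bool) : String :=
  let total0 : Int := PySem.Int.mod (rotors.foldl (· + ·) 0) 26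
  let total : Int := if encrypt then total0 else -total0
  String.ofList ((PySem.Str.upper text).toList.map (shiftChar total))

-- ===== PRECONDITION & SPEC =====
def Spec_rotor_cipher (text : String) (rotors : List Int) (encrypt : Bool) (out : String) : Prop := out = rotor_cipher_alt text rotors encrypt
instance (text : String) (rotors : List Int) (encrypt : Bool) (out : String) : Decidable (Spec_rotor_cipher text rotors encrypt out) := by unfold Spec_rotor_cipher; infer_instance

-- ===== CLAIM (what is proved, stated in full; the proofs are below) =====
def Claim_equal_rotor_cipher : Prop := ∀ (text : String) (rotors : List Int) (encrypt : Bool), Dom_rotor_cipher text rotors encrypt → Spec_rotor_cipher text rotors encrypt (rotor_cipher text rotors encrypt)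

-- ===== LEMMAS AND PROOFS =====

-- a char is "good" if, whenever it is alphabetic, it is an uppercase ASCII letter
def goodChar (c : Char) : Prop := PySem.Chars.isalpha c = true → 65 ≤ c.toNat ∧ c.toNat ≤ 90

theorem char_le_iff (a c : Char) : (a ≤ c) ↔ a.toNat ≤ c.toNat := by
  rw [Char.le_def, UInt32.le_iff_toNat_le]; rfl

theorem toNat_ofNat_valid (n : Nat) (h : n < 55296) : (Char.ofNat n).toNat = n := by
  unfold Char.ofNat
  rw [dif_pos (Or.inl h)]
  simp [Char.ofNatAux, Char.toNat, UInt32.toNat_ofNatLT]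

theorem isupper_iff (c : Char) : PySem.Chars.isupper c = true ↔ 65 ≤ c.toNat ∧ c.toNat ≤ 90 := by
  show (decide ('A' ≤ c) && decide (c ≤ 'Z')) = true ↔ _
  simp only [Bool.and_eq_true, decide_eq_true_eq, char_le_iff]
  rw [show ('A' : Char).toNat = 65 from rfl, show ('Z' : Char).toNat = 90 from rfl]

theorem islower_iff (c : Char) : PySem.Chars.islower c = true ↔ 97 ≤ c.toNat ∧ c.toNat ≤ 122 := by
  show (decide ('a' ≤ c) && decide (c ≤ 'z')) = true ↔ _
  simp only [Bool.and_eq_true, decide_eq_true_eq, char_le_iff]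
  rw [show ('a' : Char).toNat = 97 from rfl, show ('z' : Char).toNat = 122 from rfl]

theorem isalpha_iff (c : Char) :
    PySem.Chars.isalpha c = true ↔ (65 ≤ c.toNat ∧ c.toNat ≤ 90) ∨ (97 ≤ c.toNat ∧ c.toNat ≤ 122) := by
  show (PySem.Chars.isupper c || PySem.Chars.islower c) = true ↔ _
  simp only [Bool.or_eq_true, isupper_iff, islower_iff]

theorem upperChar_def (c : Char) :
    PySem.Chars.upperChar c = if PySem.Chars.islower c = true then Char.ofNat (c.toNat - 32) else c := rfl

theorem good_upperChar (c : Char) : goodChar (PySem.Chars.upperChar c) := by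
  unfold goodChar
  rw [upperChar_def]
  by_cases h : PySem.Chars.islower c = true
  · rw [if_pos h]
    have hb := (islower_iff c).mp h
    have ht : (Char.ofNat (c.toNat - 32)).toNat = c.toNat - 32 :=
      toNat_ofNat_valid _ (by omega)
    intro _; omega
  · rw [if_neg h]
    intro ha
    rcases (isalpha_iff c).mp ha with hu | hl
    · exact hu
    · exact absurd ((islower_iff c).mpr hl) h

theorem mod26 (a : Int) : PySem.Int.mod a 26 = a % 26 :=
  PySem.Int.mod_eq_emod_of_pos (by norm_num)

theorem shiftChar_alpha_toNat (s : Int) (c : Char) (h : PySem.Chars.isalpha c = true) :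
    ((shiftChar s c).toNat : Int) = ((c.toNat : Int) - 65 + s) % 26 + 65 := by
  unfold shiftChar
  rw [if_pos h, mod26]
  have h1 : (0 : Int) ≤ ((c.toNat : Int) - 65 + s) % 26 := Int.emod_nonneg _ (by norm_num)
  have h2 : ((c.toNat : Int) - 65 + s) % 26 < 26 := Int.emod_lt_of_pos _ (by norm_num)
  rw [toNat_ofNat_valid _ (by omega)]
  omega

theorem shiftChar_alpha_bounds (s : Int) (c : Char) (h : PySem.Chars.isalpha c = true) :
    65 ≤ (shiftChar s c).toNat ∧ (shiftChar s c).toNat ≤ 90 := by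
  have := shiftChar_alpha_toNat s c h
  have h1 : (0 : Int) ≤ ((c.toNat : Int) - 65 + s) % 26 := Int.emod_nonneg _ (by norm_num)
  have h2 : ((c.toNat : Int) - 65 + s) % 26 < 26 := Int.emod_lt_of_pos _ (by norm_num)
  omega

theorem shiftChar_isalpha (s : Int) (c : Char) (h : PySem.Chars.isalpha c = true) :
    PySem.Chars.isalpha (shiftChar s c) = true :=
  (isalpha_iff _).mpr (Or.inl (shiftChar_alpha_bounds s c h))

theorem good_shiftChar (s : Int) (c : Char) (_ : goodChar c) : goodChar (shiftChar s c) := by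
  intro ha
  by_cases h : PySem.Chars.isalpha c = true
  · exact shiftChar_alpha_bounds s c h
  · unfold shiftChar at ha ⊢
    rw [if_neg h] at ha
    exact absurd ha h

theorem char_toNat_inj {a b : Char} (h : a.toNat = b.toNat) : a = b := by
  have := congrArg Char.ofNat h
  rwa [Char.ofNat_toNat, Char.ofNat_toNat] at this

theorem shiftChar_comp (s t : Int) (c : Char) (_hg : goodChar c) :
    shiftChar t (shiftChar s c) = shiftChar (s + t) c := by
  by_cases h : PySem.Chars.isalpha c = true
  · apply char_toNat_inj
    have h1 := shiftChar_alpha_toNat t _ (shiftChar_isalpha s c h)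
    have h2 := shiftChar_alpha_toNat s c h
    have h3 := shiftChar_alpha_toNat (s + t) c h
    omega
  · unfold shiftChar
    rw [if_neg h, if_neg h, if_neg h]

theorem shiftChar_congr (s t : Int) (hst : s % 26 = t % 26) (c : Char) :
    shiftChar s c = shiftChar t c := by
  by_cases h : PySem.Chars.isalpha c = true
  · apply char_toNat_inj
    have h1 := shiftChar_alpha_toNat s c h
    have h2 := shiftChar_alpha_toNat t c h
    omega
  · unfold shiftChar; rw [if_neg h, if_neg h]

theorem shiftChar_zero (c : Char) (hg : goodChar c) : shiftChar 0 c = c := by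
  by_cases h : PySem.Chars.isalpha c = true
  · apply char_toNat_inj
    have h1 := shiftChar_alpha_toNat 0 c h
    have hb := hg h
    omega
  · unfold shiftChar; rw [if_neg h]

-- the main loop invariant: A's fold of per-rotor maps is one map by the signed sum
theorem foldl_add_shift (rs : List Int) (init : Int) :
    rs.foldl (· + ·) init = init + rs.foldl (· + ·) 0 := by
  induction rs generalizing init with
  | nil => simp
  | cons x xs ihx => simp only [List.foldl]; rw [ihx (init + x), ihx (0 + x)]; ring

theorem fold_maps (rotors : List Int) (e : Bool) (l : List Char) (hg : ∀ c ∈ l, goodChar c) :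
    rotors.foldl
      (fun result rotor =>
        let shift : Int := if e then rotor else -rotor
        String.ofList (result.toList.map (shiftChar shift)))
      (String.ofList l)
    = String.ofList (l.map
        (shiftChar (if e then rotors.foldl (· + ·) 0 else -(rotors.foldl (· + ·) 0)))) := by
  induction rotors generalizing l with
  | nil =>
      simp only [List.foldl]
      have hz : l.map (shiftChar (if e then (0 : Int) else -(0 : Int))) = l := by
        have hid : l.map (shiftChar (if e then (0 : Int) else -(0 : Int))) = l.map id :=
          List.map_congr_left (fun c hc => by
            cases e <;> simp only [if_true, if_false, Bool.false_eq_true, neg_zero] <;>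
              exact shiftChar_zero c (hg c hc))
        rw [hid, List.map_id]
      rw [hz]
  | cons r rs ih =>
      simp only [List.foldl]
      rw [String.toList_ofList]
      rw [ih (l.map (shiftChar (if e then r else -r)))
            (by intro c hc
                rcases List.mem_map.mp hc with ⟨d, hd, rfl⟩
                exact good_shiftChar _ d (hg d hd))]
      rw [List.map_map]
      apply congrArg
      apply List.map_congr_left
      intro c hc
      rw [Function.comp_apply, shiftChar_comp _ _ c (hg c hc)]
      apply shiftChar_congr
      have h0 : List.foldl (· + ·) (0 + r) rs = r + List.foldl (· + ·) 0 rs := by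
        rw [foldl_add_shift rs (0 + r)]; ring
      cases e <;> simp only [if_true, if_false, Bool.false_eq_true, h0]
      ring_nf

-- ===== VERDICT (by name: the statement is the Claim_ definition above) =====
theorem rotor_cipher_spec : Claim_equal_rotor_cipher := by
  intro text rotors encrypt _
  unfold Spec_rotor_cipher
  have hg : ∀ c ∈ (PySem.Str.upper text).toList, goodChar c := by
    intro c hc
    rw [PySem.Str.toList_upper] at hc
    rcases List.mem_map.mp hc with ⟨d, _, rfl⟩
    exact good_upperChar d
  have key := fold_maps rotors encrypt ((PySem.Str.upper text).toList) hg
  rw [String.ofList_toList] at key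
  show rotor_cipher text rotors encrypt = rotor_cipher_alt text rotors encrypt
  unfold rotor_cipher
  rw [key]
  show _ = String.ofList ((PySem.Str.upper text).toList.map
      (shiftChar (if encrypt then PySem.Int.mod (rotors.foldl (· + ·) 0) 26
                  else -(PySem.Int.mod (rotors.foldl (· + ·) 0) 26))))
  apply congrArg
  apply List.map_congr_left
  intro c _
  apply shiftChar_congr
  rw [mod26]
  cases encrypt <;> simp only [if_true, if_false, Bool.false_eq_true] <;> omega
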